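-- pv_equiv track=rewrite | github.com/nikdimentiy/mint | CodeWars/make_array_consecutive.py | solution
-- ===== SOURCE A (Python) =====
-- def solution(statues):
--     """
--     Calculate the minimum number of additional statues needed to arrange
--     the given statues in a sequence where each statue is exactly 1 unit
--     larger than the previous one.
--
--     Parameters:
--     statues (list of int): A list of non-negative integers representing the sizes of the statues.
--
--     Returns:
--     int: The minimum number of additional statues required.
--     """
--     # Sort the array of statue sizes in ascending order
--     statues.sort()
--
--     # Initialize a counter for additional statues needed
--     count = 0
--
--     # Set the previous statue size to the first statue in the sorted list
--     prev_statue = statues[0]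
--
--     # Iterate through the sorted list starting from the second statue
--     for i in range(1, len(statues)):
--         curr_statue = statues[i]  # Current statue size
--         diff = curr_statue - prev_statue  # Difference between current and previous statue sizes
--
--         # If the difference is greater than 1, we need additional statues
--         if diff > 1:
--             count += diff - 1  # Add the number of additional statues needed
--
--         # Update the previous statue size to the current one for the next iteration
--         prev_statue = curr_statue
--
--     return count  # Return the total count of additional statues needed
-- ===== SOURCE B (Python) =====
-- def solution(statues):
--     # closed form: span of the range minus number of distinct sizes present
--     return max(statues) - min(statues) + 1 - len(set(statues))
-- ===== Notes on version B (the rewrite author's own statement) =====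
-- stated objective: faster
-- what changed: Replaces sort-then-scan-adjacent-gaps with the closed form max-min+1-len(set(...)) computed from single linear passes.
-- outside the precondition, e.g. on solution([]): A raises IndexError, B raises ValueError
import Mathlib
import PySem

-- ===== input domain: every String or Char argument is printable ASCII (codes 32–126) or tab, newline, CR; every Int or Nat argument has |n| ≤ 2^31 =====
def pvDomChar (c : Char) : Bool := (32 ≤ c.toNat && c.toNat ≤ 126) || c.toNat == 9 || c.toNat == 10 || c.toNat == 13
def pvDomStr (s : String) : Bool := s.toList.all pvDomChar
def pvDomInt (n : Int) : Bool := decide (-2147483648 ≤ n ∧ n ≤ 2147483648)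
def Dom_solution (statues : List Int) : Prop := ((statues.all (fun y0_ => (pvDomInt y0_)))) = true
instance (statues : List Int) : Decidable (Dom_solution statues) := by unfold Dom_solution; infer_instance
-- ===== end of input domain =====

-- B replaces A's sort + adjacent-gap scan by the closed form max-min+1-#distinct (linear passes).
-- A sorts its argument in place; the equivalence proved here is about the RETURN value only.

-- ===== PORT A =====
def solution (statues : List Int) : Int :=
  let s := PySem.List.sorted statues (fun x => x) false
  let count : Int := 0
  let prev := PySem.List.pyGetD s 0 0
  let r := (PySem.List.pyRange 1 (s.length : Int) 1).foldl
    (fun (st : Int × Int) i =>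
      let cur := PySem.List.pyGetD s i 0
      let diff := cur - st.2
      ((if diff > 1 then st.1 + (diff - 1) else st.1), cur))
    (count, prev)
  r.1

-- ===== PORT B =====
def solution_alt (statues : List Int) : Int :=
  (PySem.List.max? statues (fun x => x)).getD 0
    - (PySem.List.min? statues (fun x => x)).getD 0
    + 1 - (PySem.Set.ofList statues).length

-- ===== PRECONDITION & SPEC =====
-- A raises IndexError on the empty list (statues[0]); B raises ValueError there (max([])).
def Pre_solution (statues : List Int) : Prop := statues ≠ []
instance (statues : List Int) : Decidable (Pre_solution statues) := by unfold Pre_solution; infer_instance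
def pvWitness_solution : List Int := [5, 2, 2, 6]

def Spec_solution (statues : List Int) (out : Int) : Prop := out = solution_alt statues
instance (statues : List Int) (out : Int) : Decidable (Spec_solution statues out) := by unfold Spec_solution; infer_instance

-- ===== CLAIM (what is proved, stated in full; the proofs are below) =====
def Claim_equal_solution : Prop := ∀ (statues : List Int), Dom_solution statues → Pre_solution statues → Spec_solution statues (solution statues)

-- ===== LEMMAS AND PROOFS =====

-- A's loop body as a structural fold over the tail of the sorted list
def pvStep (st : Int × Int) (cur : Int) : Int × Int :=
  ((if cur - st.2 > 1 then st.1 + (cur - st.2 - 1) else st.1), cur)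

theorem pvStep_fold_add (t : List Int) (c p : Int) :
    (t.foldl pvStep (c, p)).1 = c + (t.foldl pvStep (0, p)).1 := by
  induction t generalizing c p with
  | nil => simp
  | cons x t ih =>
    rw [List.foldl_cons, List.foldl_cons]
    show (t.foldl pvStep (pvStep (c, p) x)).1 = c + (t.foldl pvStep (pvStep (0, p) x)).1
    simp only [pvStep]
    split_ifs with h
    · rw [ih, ih (0 + (x - p - 1)) x]; ring
    · exact ih c x

theorem pvNodup_length_eq {l₁ l₂ : List Int} (h₁ : l₁.Nodup) (h₂ : l₂.Nodup)
    (h : ∀ a, a ∈ l₁ ↔ a ∈ l₂) : l₁.length = l₂.length :=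
  ((List.perm_ext_iff_of_nodup h₁ h₂).2 h).length_eq

theorem pvLast_ge (p : Int) (t : List Int) (hs : (p :: t).Pairwise (· ≤ ·)) :
    ∀ y ∈ p :: t, y ≤ (p :: t).getLast (by simp) := by
  induction t generalizing p with
  | nil => simp
  | cons x t ih =>
    intro y hy
    have hpx : p ≤ x := (List.pairwise_cons.1 hs).1 x (by simp)
    have hxt : (x :: t).Pairwise (· ≤ ·) := (List.pairwise_cons.1 hs).2
    have hgl : (p :: x :: t).getLast (by simp) = (x :: t).getLast (by simp) :=
      List.getLast_cons (by simp)
    rw [hgl]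
    rcases List.mem_cons.1 hy with h | h
    · exact h ▸ le_trans hpx (ih x hxt x (by simp))
    · exact ih x hxt y h

theorem pvOfList_len_cons (x : Int) (xs : List Int) :
    (PySem.Set.ofList (x :: xs)).length
      = (PySem.Set.ofList xs).length + (if x ∈ xs then 0 else 1) := by
  by_cases hx : x ∈ xs
  · rw [if_pos hx]
    have heq : (PySem.Set.ofList (x :: xs)).length = (PySem.Set.ofList xs).length := by
      refine pvNodup_length_eq (PySem.Set.nodup_ofList _) (PySem.Set.nodup_ofList _) ?_
      intro a
      rw [PySem.Set.mem_ofList, PySem.Set.mem_ofList, List.mem_cons]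
      exact ⟨fun h => h.elim (fun he => he ▸ hx) id, Or.inr⟩
    omega
  · rw [if_neg hx]
    have hnd : (x :: PySem.Set.ofList xs).Nodup :=
      List.nodup_cons.2 ⟨fun h => hx ((PySem.Set.mem_ofList _ _).1 h), PySem.Set.nodup_ofList _⟩
    have heq : (PySem.Set.ofList (x :: xs)).length = (x :: PySem.Set.ofList xs).length := by
      refine pvNodup_length_eq (PySem.Set.nodup_ofList _) hnd ?_
      intro a
      rw [PySem.Set.mem_ofList, List.mem_cons, List.mem_cons, PySem.Set.mem_ofList]
    simpa using heq

-- core invariant: on a sorted chain p :: t, A's gap sum is the closed form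
theorem pvChain (t : List Int) (p : Int) (hs : (p :: t).Pairwise (· ≤ ·)) :
    (t.foldl pvStep (0, p)).1
      = (p :: t).getLast (by simp) - p + 1 - (PySem.Set.ofList (p :: t)).length := by
  induction t generalizing p with
  | nil =>
    simp [PySem.Set.ofList_cons, PySem.Set.ofList_nil]
  | cons x t ih =>
    have hpx : p ≤ x := (List.pairwise_cons.1 hs).1 x (by simp)
    have hxt : (x :: t).Pairwise (· ≤ ·) := (List.pairwise_cons.1 hs).2
    have ihx := ih x hxt
    have hgl : (p :: x :: t).getLast (by simp) = (x :: t).getLast (by simp) :=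
      List.getLast_cons (by simp)
    have hstep : pvStep (0, p) x = ((if x - p > 1 then x - p - 1 else 0), x) := by
      simp only [pvStep]
      split_ifs with h
      · simp
      · rfl
    rw [List.foldl_cons, hstep, pvStep_fold_add, ihx, hgl, pvOfList_len_cons p (x :: t)]
    by_cases hpe : p = x
    · subst hpe
      rw [if_pos (by simp : p ∈ p :: t)]
      split_ifs with h <;> omega
    · have hlt : p < x := lt_of_le_of_ne hpx hpe
      have hnm : p ∉ x :: t := by
        intro hm
        rcases List.mem_cons.1 hm with h | h
        · exact hpe h
        · have := List.rel_of_pairwise_cons hxt h; omega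
      rw [if_neg hnm]
      split_ifs with h <;> omega

theorem solution_eq_closed (statues : List Int) (h : statues ≠ []) :
    solution statues = solution_alt statues := by
  obtain ⟨p, t, hs⟩ : ∃ p t, PySem.List.sorted statues (fun x => x) false = p :: t := by
    rcases hcase : PySem.List.sorted statues (fun x => x) false with _ | ⟨p, t⟩
    · exact absurd ((PySem.List.sorted_eq_nil_iff _ _ _).1 hcase) h
    · exact ⟨p, t, rfl⟩
  have hperm : (p :: t).Perm statues := hs ▸ PySem.List.sorted_perm statues (fun x => x) false
  have hpw : (p :: t).Pairwise (· ≤ ·) := by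
    have := PySem.List.sorted_pairwise statues (fun x => x)
    rw [hs] at this; exact this
  -- rewrite A into the structural fold over the tail of the sorted list
  have hA : solution statues = (t.foldl pvStep (0, p)).1 := by
    unfold solution
    rw [hs]
    show ((PySem.List.pyRange 1 (((p :: t).length : Int)) 1).foldl
        (fun st i => pvStep st (PySem.List.pyGetD (p :: t) i 0))
        ((0 : Int), PySem.List.pyGetD (p :: t) 0 0)).1 = _
    rw [PySem.List.pyGetD_zero_cons,
      PySem.List.foldl_pyRange_pyGetD' (p :: t) 0 pvStep ((0 : Int), p) (by omega : (0:Int) ≤ 1)]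
    rfl
  rw [hA, pvChain t p hpw]
  unfold solution_alt
  have hmin : (PySem.List.min? statues (fun x => x)).getD 0 = p := by
    rcases hm : PySem.List.min? statues (fun x => x) with _ | m
    · rw [PySem.List.min?_eq_none_iff] at hm; exact absurd hm h
    · have hmem := PySem.List.min?_mem hm
      have hmn := PySem.List.min?_isMin hm
      have h1 : m ≤ p := hmn p (hperm.mem_iff.1 (by simp))
      have h2 : p ≤ m := by
        rcases List.mem_cons.1 (hperm.mem_iff.2 hmem) with h' | h'
        · omega
        · exact List.rel_of_pairwise_cons hpw h'
      simp only [Option.getD_some]; omega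
  have hmax : (PySem.List.max? statues (fun x => x)).getD 0 = (p :: t).getLast (by simp) := by
    rcases hm : PySem.List.max? statues (fun x => x) with _ | m
    · rw [PySem.List.max?_eq_none_iff] at hm; exact absurd hm h
    · have hmem := PySem.List.max?_mem hm
      have hmx := PySem.List.max?_isMax hm
      have h1 : (p :: t).getLast (by simp) ≤ m :=
        hmx _ (hperm.mem_iff.1 (List.getLast_mem _))
      have h2 : m ≤ (p :: t).getLast (by simp) :=
        pvLast_ge p t hpw m (hperm.mem_iff.2 hmem)
      simp only [Option.getD_some]; omega
  have hset : (PySem.Set.ofList statues).length = (PySem.Set.ofList (p :: t)).length := by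
    refine pvNodup_length_eq (PySem.Set.nodup_ofList _) (PySem.Set.nodup_ofList _) ?_
    intro a
    rw [PySem.Set.mem_ofList, PySem.Set.mem_ofList, hperm.mem_iff]
  rw [hmin, hmax, hset]

-- ===== VERDICT (by name: the statement is the Claim_ definition above) =====
theorem solution_spec : Claim_equal_solution := by
  intro statues _ hpre
  unfold Spec_solution
  exact solution_eq_closed statues hpre
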